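-- pv_equiv track=rewrite | github.com/koba925/alds | atcoder/ABC125/C.py | blackboard
-- ===== SOURCE A (Python) =====
-- import math  # https://docs.python.org/ja/3/library/math.html
--
-- def blackboard(N, A):
--     A = [0] + A + [0]
--     left_gcd, right_gcd = [0] * (N + 2), [0] * (N + 2)
--     for i in range(1, N + 1):
--         left_gcd[i] = math.gcd(left_gcd[i - 1], A[i])
--     for i in reversed(range(1, N + 1)):
--         right_gcd[i] = math.gcd(right_gcd[i + 1], A[i])
--
--     max_gcd = 0
--     for i in range(1, N + 1):
--         max_gcd = max(max_gcd, math.gcd(left_gcd[i - 1], right_gcd[i + 1]))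
--
--     return max_gcd
-- ===== SOURCE B (Python) =====
-- import math
--
--
-- def blackboard(N, A):
--     best = 0
--     for i in range(N):
--         g = 0
--         for j in range(N):
--             if j != i:
--                 g = math.gcd(g, A[j])
--         best = max(best, g)
--     return best
-- ===== Notes on version B (the rewrite author's own statement) =====
-- stated objective: simpler
-- what changed: Replaced the padded prefix/suffix gcd tables by a direct double loop: for each index i take the running gcd (started at 0) of all other elements and keep the maximum.
-- outside the precondition, e.g. on blackboard(2, [6]): A returns 6, B raises IndexError
import Mathlib
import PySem

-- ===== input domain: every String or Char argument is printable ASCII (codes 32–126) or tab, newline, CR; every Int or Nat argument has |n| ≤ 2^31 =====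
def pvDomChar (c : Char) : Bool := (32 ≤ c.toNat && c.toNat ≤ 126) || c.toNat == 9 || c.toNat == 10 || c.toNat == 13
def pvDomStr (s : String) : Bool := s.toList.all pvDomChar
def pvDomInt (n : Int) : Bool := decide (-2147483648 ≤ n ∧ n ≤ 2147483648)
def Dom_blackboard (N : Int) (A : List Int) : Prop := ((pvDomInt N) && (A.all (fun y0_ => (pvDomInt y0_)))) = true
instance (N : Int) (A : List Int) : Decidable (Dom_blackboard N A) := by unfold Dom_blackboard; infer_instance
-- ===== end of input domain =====

-- B replaces A's padded prefix/suffix gcd tables by a direct double loop (simpler, not faster).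

-- math.gcd on ints: the nonnegative gcd (exact: Int.gcd is Nat.gcd of the absolute values)
def pg (a b : Int) : Int := Int.gcd a b

-- ===== PORT A =====
def blackboard (N : Int) (A : List Int) : Int :=
  let A2 := [0] ++ A ++ [0]
  let left0 : List Int := List.replicate (N + 2).toNat 0
  let right0 : List Int := List.replicate (N + 2).toNat 0
  -- indices written/read are in range whenever Pre_ holds, so the total forms pySetD/pyGetD are exact here
  let left := (PySem.List.pyRange 1 (N + 1) 1).foldl
    (fun lg i => PySem.List.pySetD lg i
      (pg (PySem.List.pyGetD lg (i - 1) 0) (PySem.List.pyGetD A2 i 0))) left0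
  let right := ((PySem.List.pyRange 1 (N + 1) 1).reverse).foldl
    (fun rg i => PySem.List.pySetD rg i
      (pg (PySem.List.pyGetD rg (i + 1) 0) (PySem.List.pyGetD A2 i 0))) right0
  (PySem.List.pyRange 1 (N + 1) 1).foldl
    (fun m i => max m
      (pg (PySem.List.pyGetD left (i - 1) 0) (PySem.List.pyGetD right (i + 1) 0))) 0

-- ===== PORT B =====
def blackboard_alt (N : Int) (A : List Int) : Int :=
  (PySem.List.pyRange 0 N 1).foldl (fun best i =>
    max best ((PySem.List.pyRange 0 N 1).foldl
      (fun g j => if j ≠ i then pg g (PySem.List.pyGetD A j 0) else g) 0)) 0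

-- ===== PRECONDITION & SPEC =====
-- Pre_ excludes N = len(A)+1, where A silently pads the list and treats a phantom 0 past the end
-- as the removable element; B indexes A directly and raises IndexError there.  (For N > len(A)+1
-- A itself raises IndexError.)
def Pre_blackboard (N : Int) (A : List Int) : Prop := N ≤ (A.length : Int)
instance (N : Int) (A : List Int) : Decidable (Pre_blackboard N A) := by unfold Pre_blackboard; infer_instance

def pvWitness_blackboard : Int × List Int := (3, [6, 10, 15])

def Spec_blackboard (N : Int) (A : List Int) (out : Int) : Prop := out = blackboard_alt N A
instance (N : Int) (A : List Int) (out : Int) : Decidable (Spec_blackboard N A out) := by unfold Spec_blackboard; infer_instance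

-- ===== CLAIM (what is proved, stated in full; the proofs are below) =====
def Claim_equal_blackboard : Prop := ∀ (N : Int) (A : List Int), Dom_blackboard N A → Pre_blackboard N A → Spec_blackboard N A (blackboard N A)

-- ===== LEMMAS AND PROOFS =====

-- gcd of a prefix, folded left; gcd of a suffix, folded right (the shape A's right table builds)
def preg (l : List Int) : Int := l.foldl pg 0
def sufg : List Int → Int
  | [] => 0
  | a :: t => pg (sufg t) a

theorem pg_nonneg (a b : Int) : 0 ≤ pg a b := Int.natCast_nonneg _

theorem pg_comm (a b : Int) : pg a b = pg b a := by simp [pg, Int.gcd, Nat.gcd_comm]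

theorem pg_assoc (a b c : Int) : pg (pg a b) c = pg a (pg b c) := by
  simp [pg, Int.gcd, Nat.gcd_assoc]

theorem pg_zero_right (a : Int) (h : 0 ≤ a) : pg a 0 = a := by
  simp [pg, Int.gcd]; omega

theorem sufg_cons (a : Int) (t : List Int) : sufg (a :: t) = pg (sufg t) a := rfl

theorem preg_append_singleton (l : List Int) (a : Int) :
    preg (l ++ [a]) = pg (preg l) a := by
  simp [preg, List.foldl_append]

theorem preg_nonneg (l : List Int) : 0 ≤ preg l := by
  induction l using List.reverseRecOn with
  | nil => exact le_rfl
  | append_singleton t a _ => rw [preg_append_singleton]; exact pg_nonneg _ _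

theorem foldl_pg_sufg (l : List Int) (x : Int) (h : 0 ≤ x) :
    l.foldl pg x = pg x (sufg l) := by
  induction l generalizing x with
  | nil => simpa [sufg] using (pg_zero_right x h).symm
  | cons a t ih =>
    simp only [List.foldl_cons, sufg]
    rw [ih _ (pg_nonneg x a), pg_assoc x a (sufg t), pg_comm a (sufg t)]

-- the per-index value: gcd of all of A[0:n] except index k
def term (A : List Int) (n k : Nat) : Int :=
  pg (preg (A.take k)) (sufg ((A.take n).drop (k + 1)))

theorem foldl_range_getD (xs : List Int) (m : Nat) (hm : m ≤ xs.length) (init : Int) :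
    (List.range m).foldl (fun g k => pg g (xs.getD k 0)) init = (xs.take m).foldl pg init := by
  induction m generalizing init with
  | zero => simp
  | succ m ih =>
    have h1 : m < xs.length := by omega
    rw [List.range_succ, List.foldl_append, ih (by omega)]
    simp only [List.foldl_cons, List.foldl_nil]
    rw [List.take_add_one, List.getElem?_eq_getElem h1]
    simp only [Option.toList_some, List.foldl_append, List.foldl_cons, List.foldl_nil]
    rw [List.getD_eq_getElem _ _ h1]

-- B's inner loop for index k computes term A n k
theorem foldl_congr' {α β : Type} (l : List α) (f g : β → α → β) (init : β)
    (h : ∀ acc x, x ∈ l → f acc x = g acc x) : l.foldl f init = l.foldl g init := by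
  induction l generalizing init with
  | nil => rfl
  | cons a t ih =>
    simp only [List.foldl_cons]
    rw [h init a (by simp), ih _ (fun acc x hx => h acc x (by simp [hx]))]

theorem inner_eq_term (A : List Int) (n k : Nat) (hk : k < n) (hn : n ≤ A.length) :
    (List.range n).foldl (fun g j => if j ≠ k then pg g (A.getD j 0) else g) 0
      = term A n k := by
  have hsplit : List.range n = (List.range k ++ [k]) ++ (List.range (n - (k+1))).map ((k+1) + ·) := by
    rw [← List.range_succ, ← List.range_add]
    congr 1; omega
  rw [hsplit, List.foldl_append, List.foldl_append]
  -- prefix part: indices j < k, the branch is always taken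
  have hpre : (List.range k).foldl (fun g j => if j ≠ k then pg g (A.getD j 0) else g) 0
      = preg (A.take k) := by
    rw [foldl_congr' _ _ (fun g j => pg g (A.getD j 0)) _
      (by intro acc x hx; have := List.mem_range.1 hx; simp; omega)]
    exact foldl_range_getD A k (by omega) 0
  rw [hpre]
  -- the skipped element
  have hmid : (List.foldl (fun g j => if j ≠ k then pg g (A.getD j 0) else g) (preg (A.take k)) [k])
      = preg (A.take k) := by simp
  rw [hmid]
  -- suffix part: indices k+1+x
  rw [List.foldl_map]
  have hcong : (List.range (n - (k+1))).foldl
      (fun g x => if (k+1) + x ≠ k then pg g (A.getD ((k+1) + x) 0) else g) (preg (A.take k))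
      = (List.range (n - (k+1))).foldl
      (fun g x => pg g (((A.take n).drop (k+1)).getD x 0)) (preg (A.take k)) := by
    apply foldl_congr'
    intro acc x hx
    have hx' := List.mem_range.1 hx
    have hne : (k+1) + x ≠ k := by omega
    have htk : (List.take n A)[(k+1) + x]? = A[(k+1) + x]? :=
      List.getElem?_take_of_lt (by omega)
    simp [hne, List.getD, htk]
  rw [hcong]
  have hlen : ((A.take n).drop (k+1)).length = n - (k+1) := by
    simp [List.length_drop, List.length_take]; omega
  have hfr := foldl_range_getD ((A.take n).drop (k+1)) (n - (k+1)) (le_of_eq hlen.symm)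
    (preg (A.take k))
  rw [hfr,
    show List.take (n - (k+1)) ((A.take n).drop (k+1)) = (A.take n).drop (k+1) from
      List.take_of_length_le (le_of_eq hlen),
    foldl_pg_sufg _ _ (preg_nonneg _)]
  rfl

-- A's padded array reads as A itself on interior indices
theorem pad_getD (A : List Int) (m : Nat) (hm : m < A.length) :
    (([0] ++ A ++ [0]) : List Int).getD (m+1) 0 = A.getD m 0 := by
  have h1 : m + 1 < ([0] ++ A ++ [0]).length := by simp; omega
  rw [List.getD_eq_getElem _ _ h1, List.getD_eq_getElem _ _ hm]
  simp [hm]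

-- ----- the left table -----

def stepL (A : List Int) (T : List Int) (j : Nat) : List Int :=
  T.set (j+1) (pg (T.getD j 0) ((([0] ++ A ++ [0]) : List Int).getD (j+1) 0))

def leftT (A : List Int) (n m : Nat) : List Int :=
  (List.range m).foldl (stepL A) (List.replicate (n+2) 0)

theorem leftT_length (A : List Int) (n m : Nat) : (leftT A n m).length = n + 2 := by
  induction m with
  | zero => simp [leftT]
  | succ m ih =>
    simp only [leftT, List.range_succ, List.foldl_append] at *
    simp [stepL, ih]

theorem leftT_getD (A : List Int) (n : Nat) (hn : n ≤ A.length) (m : Nat) :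
    m ≤ n → ∀ k : Nat,
    (leftT A n m).getD k 0 = if k ≤ m then preg (A.take k) else 0 := by
  induction m with
  | zero =>
    intro _ k
    simp only [leftT, List.range_zero, List.foldl_nil]
    by_cases hk : k ≤ 0
    · have : k = 0 := by omega
      simp [this, preg]
    · simp [hk]
  | succ m ih =>
    intro hm k
    have hT := leftT_length A n m
    have hrec := ih (by omega)
    have hstep : leftT A n (m+1) = stepL A (leftT A n m) m := by
      simp [leftT, List.range_succ, List.foldl_append]
    rw [hstep]
    unfold stepL
    have h2 : m < A.length := by omega
    have hval : pg ((leftT A n m).getD m 0) ((([0] ++ A ++ [0]) : List Int).getD (m+1) 0)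
        = preg (A.take (m+1)) := by
      rw [hrec m, if_pos le_rfl, pad_getD A m (by omega), List.take_add_one,
        List.getElem?_eq_getElem h2]
      simp only [Option.toList_some]
      rw [preg_append_singleton, List.getD_eq_getElem _ _ h2]
    rw [hval, List.getD_eq_getElem?_getD, List.getElem?_set]
    by_cases hk : k = m + 1
    · subst hk
      rw [if_pos rfl, if_pos (by rw [hT]; omega), if_pos le_rfl]
      rfl
    · rw [if_neg (by omega), ← List.getD_eq_getElem?_getD, hrec k]
      by_cases h1 : k ≤ m
      · rw [if_pos h1, if_pos (by omega)]
      · rw [if_neg h1, if_neg (by omega)]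

-- ----- the right table -----

def stepR (A : List Int) (T : List Int) (j : Nat) : List Int :=
  T.set (j+1) (pg (T.getD (j+2) 0) ((([0] ++ A ++ [0]) : List Int).getD (j+1) 0))

def rightInv (A : List Int) (n m : Nat) (T : List Int) : Prop :=
  T.length = n + 2 ∧ ∀ k, T.getD k 0 = if m < k ∧ k ≤ n then sufg ((A.take n).drop (k-1)) else 0

theorem rightT_inv (A : List Int) (n : Nat) (hn : n ≤ A.length) :
    ∀ m, m ≤ n → ∀ T, rightInv A n m T →
      rightInv A n 0 (((List.range m).reverse).foldl (stepR A) T) := by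
  intro m
  induction m with
  | zero => intro _ T hT; simpa using hT
  | succ m ih =>
    intro hm T hT
    obtain ⟨hTlen, hTget⟩ := hT
    have hrev : (List.range (m+1)).reverse = m :: (List.range m).reverse := by
      simp [List.range_succ]
    rw [hrev, List.foldl_cons]
    apply ih (by omega)
    constructor
    · simp [stepR, hTlen]
    · intro k
      unfold stepR
      have hval : pg (T.getD (m+2) 0) ((([0] ++ A ++ [0]) : List Int).getD (m+1) 0)
          = sufg ((A.take n).drop m) := by
      -- T.getD (m+2) = sufg (drop (m+1)) whether filled (m+2 ≤ n) or the zero pad (m+2 = n+1)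
        have hTm2 : T.getD (m+2) 0 = sufg ((A.take n).drop (m+1)) := by
          rw [hTget (m+2)]
          by_cases h2 : m + 2 ≤ n
          · rw [if_pos ⟨by omega, h2⟩]
            simp
          · rw [if_neg (by omega)]
            have he : m + 1 = n := by omega
            rw [he, List.drop_of_length_le (by simp [List.length_take])]
            rfl
        have hmlt : m < (A.take n).length := by simp [List.length_take]; omega
        have hdrop : (A.take n).drop m = (A.take n)[m]'hmlt :: (A.take n).drop (m+1) :=
          (List.getElem_cons_drop hmlt).symm
        have h2 : m < A.length := by omega
        rw [hTm2, pad_getD A m (by omega), hdrop, sufg_cons]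
        congr 1
        rw [List.getD_eq_getElem _ _ h2]
        simp [List.getElem_take]
      rw [hval, List.getD_eq_getElem?_getD, List.getElem?_set]
      by_cases hk : k = m + 1
      · subst hk
        rw [if_pos rfl, if_pos (by rw [hTlen]; omega)]
        simp only [Option.getD_some]
        rw [if_pos (show m < m + 1 ∧ m + 1 ≤ n by omega)]
        simp
      · rw [if_neg (by omega), ← List.getD_eq_getElem?_getD, hTget k]
        by_cases h1 : m + 1 < k ∧ k ≤ n
        · rw [if_pos h1, if_pos ⟨by omega, h1.2⟩]
        · rw [if_neg h1, if_neg (by omega)]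

def rightT (A : List Int) (n : Nat) : List Int :=
  ((List.range n).reverse).foldl (stepR A) (List.replicate (n+2) 0)

theorem rightT_getD (A : List Int) (n : Nat) (hn : n ≤ A.length) (k : Nat) :
    (rightT A n).getD k 0 = if 0 < k ∧ k ≤ n then sufg ((A.take n).drop (k-1)) else 0 := by
  have hinv : rightInv A n n (List.replicate (n+2) 0) := by
    unfold rightInv
    refine ⟨by simp, fun k => ?_⟩
    rw [if_neg (by omega)]
    simp
  exact (rightT_inv A n hn n le_rfl _ hinv).2 k

-- ----- bridging the ports' pyRange folds to Nat-level folds -----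

theorem pyRange_one_shift (n : Nat) :
    PySem.List.pyRange 1 ((n : Int) + 1) 1 = (List.range n).map (fun (k : Nat) => 1 + (k : Int)) := by
  rw [PySem.List.pyRange_one]
  have h : ((n : Int) + 1 - 1).toNat = n := by omega
  rw [h]

theorem pyRange_zero_nat' (n : Nat) :
    PySem.List.pyRange 0 (n : Int) 1 = (List.range n).map (fun (k : Nat) => (k : Int)) := by
  rw [PySem.List.pyRange_one]
  have h : ((n : Int) - 0).toNat = n := by omega
  rw [h]
  simp

-- ----- the two ports both compute foldl max over term -----

theorem stepL_py (A : List Int) (T : List Int) (k : Nat) :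
    PySem.List.pySetD T (1 + (k : Int))
      (pg (PySem.List.pyGetD T (1 + (k : Int) - 1) 0)
          (PySem.List.pyGetD ([0] ++ A ++ [0]) (1 + (k : Int)) 0))
      = stepL A T k := by
  have e1 : (1 : Int) + (k : Int) - 1 = ((k : Nat) : Int) := by ring
  have e2 : (1 : Int) + (k : Int) = ((k + 1 : Nat) : Int) := by push_cast; ring
  rw [e1, e2, PySem.List.pySetD_natCast, PySem.List.pyGetD_natCast, PySem.List.pyGetD_natCast]
  rfl

theorem stepR_py (A : List Int) (T : List Int) (k : Nat) :
    PySem.List.pySetD T (1 + (k : Int))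
      (pg (PySem.List.pyGetD T (1 + (k : Int) + 1) 0)
          (PySem.List.pyGetD ([0] ++ A ++ [0]) (1 + (k : Int)) 0))
      = stepR A T k := by
  have e1 : (1 : Int) + (k : Int) + 1 = ((k + 2 : Nat) : Int) := by push_cast; ring
  have e2 : (1 : Int) + (k : Int) = ((k + 1 : Nat) : Int) := by push_cast; ring
  rw [e1, e2, PySem.List.pySetD_natCast, PySem.List.pyGetD_natCast, PySem.List.pyGetD_natCast]
  rfl

theorem blackboard_eq_foldl_term (N : Int) (A : List Int) (h0 : 0 ≤ N)
    (hn : N ≤ (A.length : Int)) :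
    blackboard N A = (List.range N.toNat).foldl (fun m k => max m (term A N.toNat k)) 0 := by
  obtain ⟨n, rfl⟩ := Int.eq_ofNat_of_zero_le h0
  have hnA : n ≤ A.length := by exact_mod_cast hn
  have hrep : ((n : Int) + 2).toNat = n + 2 := by omega
  simp only [blackboard, pyRange_one_shift n, hrep, Int.toNat_natCast]
  have hleft : List.foldl
      (fun lg i => PySem.List.pySetD lg i
        (pg (PySem.List.pyGetD lg (i - 1) 0) (PySem.List.pyGetD ([0] ++ A ++ [0]) i 0)))
      (List.replicate (n + 2) 0) ((List.range n).map (fun (k : Nat) => 1 + (k : Int)))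
      = leftT A n n := by
    rw [List.foldl_map]
    exact foldl_congr' _ _ _ _ (fun T k _ => stepL_py A T k)
  have hright : List.foldl
      (fun rg i => PySem.List.pySetD rg i
        (pg (PySem.List.pyGetD rg (i + 1) 0) (PySem.List.pyGetD ([0] ++ A ++ [0]) i 0)))
      (List.replicate (n + 2) 0) (((List.range n).map (fun (k : Nat) => 1 + (k : Int))).reverse)
      = rightT A n := by
    rw [← List.map_reverse, List.foldl_map]
    exact foldl_congr' _ _ _ _ (fun T k _ => stepR_py A T k)
  rw [hleft, hright, List.foldl_map]
  apply foldl_congr'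
  intro acc k hkmem
  have hk : k < n := List.mem_range.1 hkmem
  have e1 : (1 : Int) + (k : Int) - 1 = ((k : Nat) : Int) := by ring
  have e2 : (1 : Int) + (k : Int) + 1 = ((k + 2 : Nat) : Int) := by push_cast; ring
  rw [e1, e2, PySem.List.pyGetD_natCast, PySem.List.pyGetD_natCast]
  congr 1
  rw [leftT_getD A n hnA n le_rfl k, if_pos (by omega), rightT_getD A n hnA (k + 2)]
  unfold term
  congr 1
  by_cases h2 : k + 2 ≤ n
  · rw [if_pos ⟨by omega, h2⟩]
    simp
  · rw [if_neg (by omega)]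
    have hkn : k + 1 = n := by omega
    rw [hkn, List.drop_of_length_le (by simp [List.length_take])]
    rfl

theorem blackboard_alt_eq_foldl_term (N : Int) (A : List Int) (h0 : 0 ≤ N)
    (hn : N ≤ (A.length : Int)) :
    blackboard_alt N A = (List.range N.toNat).foldl (fun m k => max m (term A N.toNat k)) 0 := by
  obtain ⟨n, rfl⟩ := Int.eq_ofNat_of_zero_le h0
  have hnA : n ≤ A.length := by exact_mod_cast hn
  simp only [blackboard_alt, pyRange_zero_nat' n, Int.toNat_natCast]
  rw [List.foldl_map]
  apply foldl_congr'
  intro acc ik hik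
  have hikn : ik < n := List.mem_range.1 hik
  congr 1
  rw [List.foldl_map]
  rw [foldl_congr' _ _ (fun g jk => if jk ≠ ik then pg g (A.getD jk 0) else g) _
    (by
      intro g jk _
      by_cases h : jk = ik
      · simp [h]
      · have hne : (jk : Int) ≠ (ik : Int) := by exact_mod_cast h
        simp [h, hne])]
  exact inner_eq_term A n ik hikn hnA

-- ===== VERDICT (by name: the statement is the Claim_ definition above) =====
theorem blackboard_spec : Claim_equal_blackboard := by
  intro N A _ hpre
  unfold Spec_blackboard
  by_cases h0 : 0 ≤ N
  · rw [blackboard_eq_foldl_term N A h0 hpre, blackboard_alt_eq_foldl_term N A h0 hpre]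
  · have h1 : N + 1 ≤ 1 := by omega
    have h2 : N ≤ 0 := by omega
    unfold blackboard blackboard_alt
    rw [PySem.List.pyRange_one_eq_nil h1, PySem.List.pyRange_one_eq_nil h2]
    simp
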